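-- pv_equiv track=rewrite | github.com/lpwpower/CARNAS | nas/space_carnas.py | find_sequence_indices
-- ===== SOURCE A (Python) =====
-- def find_sequence_indices(numbers, target):
--     start_index = -1
--     end_index = -1
--     for i, num in enumerate(numbers):
--         if num == target:
--             if start_index == -1:
--                 start_index = i
--             end_index = i
--         elif start_index != -1:
--             break
--     return start_index, end_index
-- ===== SOURCE B (Python) =====
-- def find_sequence_indices(numbers, target):
--     # Run-partition strategy: walk the list as maximal runs of equal values,
--     # testing one representative per run; answer the first run whose value is target.
--     n = len(numbers)
--     i = 0
--     while i < n:
--         j = i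
--         while j + 1 < n and numbers[j + 1] == numbers[i]:
--             j += 1
--         if numbers[i] == target:
--             return i, j
--         i = j + 1
--     return -1, -1
-- ===== Notes on version B (the rewrite author's own statement) =====
-- stated objective: alternative
-- what changed: Replaces A's element-by-element scan with start/end flags and a break by a run-partition walk: the list is traversed as maximal runs of equal adjacent values, target is compared once per run, and the first run whose value is target yields (run start, run end).
import Mathlib
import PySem

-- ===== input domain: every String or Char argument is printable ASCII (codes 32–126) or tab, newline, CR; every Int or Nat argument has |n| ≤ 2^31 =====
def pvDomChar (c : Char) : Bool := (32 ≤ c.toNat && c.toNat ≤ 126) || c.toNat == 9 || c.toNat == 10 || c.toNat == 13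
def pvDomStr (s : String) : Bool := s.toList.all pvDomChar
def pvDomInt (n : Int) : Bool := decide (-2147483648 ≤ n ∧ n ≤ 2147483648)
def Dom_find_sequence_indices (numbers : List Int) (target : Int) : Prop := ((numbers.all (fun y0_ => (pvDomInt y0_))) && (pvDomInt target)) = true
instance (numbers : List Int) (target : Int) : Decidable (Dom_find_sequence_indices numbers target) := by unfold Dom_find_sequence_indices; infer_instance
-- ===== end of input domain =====

-- B replaces A's element-by-element scan with start/end flags and a break by a run-partition
-- walk (maximal runs of equal adjacent values, target compared once per run); objective:
-- alternative. Equivalence is proved on all inputs (both total).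

-- ===== PORT A =====
-- A's loop over enumerate(numbers) with state (start_index, end_index) and the break.
def goA : List Int → Int → Int → Int → Int → Int × Int
  | [], _, _, s, e => (s, e)
  | n :: rest, t, i, s, e =>
    if n = t then goA rest t (i + 1) (if s = -1 then i else s) i
    else if s ≠ -1 then (s, e)
    else goA rest t (i + 1) s e

def find_sequence_indices (numbers : List Int) (target : Int) : Int × Int :=
  goA numbers target 0 (-1) (-1)

-- ===== PORT B =====
-- B's inner while loop: j += 1 while numbers[j+1] == v (v = numbers[i]); fuel = len suffices.
def runEndB (numbers : List Int) (v : Int) : Nat → Nat → Nat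
  | 0, j => j
  | fuel + 1, j =>
    if h : j + 1 < numbers.length then
      if numbers[j + 1] = v then runEndB numbers v fuel (j + 1) else j
    else j

-- B's outer while loop over run starts i; each iteration advances i past a whole run,
-- so fuel = len(numbers) suffices (the fuel-0 answer coincides with the i ≥ n exit).
def scanRunsB (numbers : List Int) (target : Int) : Nat → Nat → Int × Int
  | 0, _ => (-1, -1)
  | fuel + 1, i =>
    if h : i < numbers.length then
      let j := runEndB numbers numbers[i] numbers.length i
      if numbers[i] = target then ((i : Int), (j : Int))
      else scanRunsB numbers target fuel (j + 1)
    else (-1, -1)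

def find_sequence_indices_alt (numbers : List Int) (target : Int) : Int × Int :=
  scanRunsB numbers target numbers.length 0

-- ===== PRECONDITION & SPEC =====
def Spec_find_sequence_indices (numbers : List Int) (target : Int) (out : Int × Int) : Prop := out = find_sequence_indices_alt numbers target
instance (numbers : List Int) (target : Int) (out : Int × Int) : Decidable (Spec_find_sequence_indices numbers target out) := by unfold Spec_find_sequence_indices; infer_instance

-- ===== CLAIM (what is proved, stated in full; the proofs are below) =====
def Claim_equal_find_sequence_indices : Prop := ∀ (numbers : List Int) (target : Int), Dom_find_sequence_indices numbers target → Spec_find_sequence_indices numbers target (find_sequence_indices numbers target)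

-- ===== LEMMAS AND PROOFS =====

-- length of the leading run of t in l
def leadC (t : Int) : List Int → Nat
  | [] => 0
  | n :: rest => if n = t then leadC t rest + 1 else 0

theorem leadC_le_length (t : Int) (l : List Int) : leadC t l ≤ l.length := by
  induction l with
  | nil => simp [leadC]
  | cons n rest ih => by_cases h : n = t <;> simp [leadC, h] <;> omega

theorem leadC_append_ne (v w : Int) (hvw : v ≠ w) (xs ys : List Int) :
    leadC v (xs ++ w :: ys) ≤ xs.length := by
  induction xs with
  | nil => simp [leadC, Ne.symm hvw]
  | cons x xs ih =>
    by_cases h : x = v <;> simp [leadC, h] <;> omega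

-- ----- A-side characterisation -----

theorem goA_not_mem (t : Int) (l : List Int) (i : Int) (h : t ∉ l) :
    goA l t i (-1) (-1) = (-1, -1) := by
  induction l generalizing i with
  | nil => rfl
  | cons n rest ih =>
    simp only [List.mem_cons, not_or] at h
    simp only [goA, if_neg (fun hn => h.1 (Eq.symm hn))]
    simpa using ih _ h.2

theorem goA_found (t : Int) (l : List Int) (i s e : Int) (hs : s ≠ -1) :
    goA l t i s e = (s, if leadC t l = 0 then e else i + leadC t l - 1) := by
  induction l generalizing i e with
  | nil => simp [goA, leadC]
  | cons n rest ih =>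
    by_cases hn : n = t
    · simp only [goA, if_neg hs, leadC, if_pos hn, ih (i + 1) i]
      rcases Nat.eq_zero_or_pos (leadC t rest) with h0 | hp
      · simp [h0]
      · have : leadC t rest ≠ 0 := Nat.pos_iff_ne_zero.mp hp
        simp only [this, if_false, Nat.add_eq_zero_iff, one_ne_zero, and_false, if_false]
        push_cast; ring
    · simp [goA, hn, hs, leadC]

theorem goA_split (t : Int) (pre rest : List Int) (i : Int) (hi : 0 ≤ i) (hp : t ∉ pre) :
    goA (pre ++ t :: rest) t i (-1) (-1) =
      (i + pre.length, i + pre.length + leadC t rest) := by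
  induction pre generalizing i with
  | nil =>
    have hi' : i ≠ -1 := by omega
    have step : goA (t :: rest) t i (-1) (-1) = goA rest t (i + 1) i i := by
      simp [goA]
    rw [List.nil_append, step, goA_found t rest (i + 1) i i hi']
    rcases Nat.eq_zero_or_pos (leadC t rest) with h0 | hp'
    · simp [h0]
    · have hne : leadC t rest ≠ 0 := by omega
      simp only [hne, if_false, List.length_nil, Prod.mk.injEq]
      refine ⟨by push_cast; ring, by push_cast; ring⟩
  | cons n pre' ih =>
    simp only [List.mem_cons, not_or] at hp
    have step : goA ((n :: pre') ++ t :: rest) t i (-1) (-1) =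
        goA (pre' ++ t :: rest) t (i + 1) (-1) (-1) := by
      have hn : ¬ n = t := fun hn => hp.1 (Eq.symm hn)
      simp [goA, hn]
    rw [step, ih (i + 1) (by omega) hp.2]
    simp only [List.length_cons, Prod.mk.injEq]
    refine ⟨by push_cast; ring, by push_cast; ring⟩

-- ----- B-side characterisation -----

theorem runEndB_eq (v : Int) (l : List Int) (fuel e : Nat) :
    runEndB l v fuel e = e + min fuel (leadC v (l.drop (e + 1))) := by
  induction fuel generalizing e with
  | zero => simp [runEndB]
  | succ f ih =>
    simp only [runEndB]
    by_cases h : e + 1 < l.length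
    · have hdrop : l.drop (e + 1) = l[e + 1] :: l.drop (e + 2) :=
        List.drop_eq_getElem_cons h
      by_cases ht : l[e + 1] = v
      · rw [dif_pos h, if_pos ht, ih (e + 1), hdrop, leadC, if_pos ht]
        have h2 : e + 1 + 1 = e + 2 := by omega
        rw [h2]
        omega
      · rw [dif_pos h, if_neg ht, hdrop, leadC, if_neg ht]
        omega
    · rw [dif_neg h, List.drop_eq_nil_of_le (by omega)]
      simp [leadC]

theorem scanRunsB_not_mem (t : Int) (l : List Int) (f i : Nat)
    (h : t ∉ l.drop i) : scanRunsB l t f i = (-1, -1) := by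
  induction f generalizing i with
  | zero => rfl
  | succ f ih =>
    simp only [scanRunsB]
    by_cases hl : i < l.length
    · rw [dif_pos hl]
      have hmem : l[i] ∈ l.drop i := by
        rw [List.drop_eq_getElem_cons hl]; exact List.mem_cons_self
      have hne : ¬ l[i] = t := fun he => h (he ▸ hmem)
      rw [if_neg hne]
      apply ih
      intro hm
      apply h
      have hij : i ≤ runEndB l l[i] l.length i + 1 := by
        rw [runEndB_eq]; omega
      have hdd : l.drop (runEndB l l[i] l.length i + 1) =
          (l.drop i).drop (runEndB l l[i] l.length i + 1 - i) := by
        rw [List.drop_drop]; congr 1; omega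
      rw [hdd] at hm
      exact List.drop_subset _ _ hm
    · rw [dif_neg hl]

theorem scanRunsB_mem (t : Int) (l : List Int) (f i : Nat) (hf : l.length - i ≤ f)
    (pre suf : List Int) (hsplit : l.drop i = pre ++ t :: suf) (hp : t ∉ pre) :
    scanRunsB l t f i = ((i : Int) + pre.length, (i : Int) + pre.length + leadC t suf) := by
  induction f generalizing i pre suf with
  | zero =>
    exfalso
    have : l.drop i = [] := List.drop_eq_nil_of_le (by omega)
    rw [this] at hsplit
    exact List.cons_ne_nil _ _ (List.append_eq_nil_iff.mp hsplit.symm).2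
  | succ f ih =>
    have hne : l.drop i ≠ [] := by rw [hsplit]; simp
    have hl : i < l.length := by
      by_contra hc
      exact hne (List.drop_eq_nil_of_le (by omega))
    have hhead : l.drop i = l[i] :: l.drop (i + 1) := List.drop_eq_getElem_cons hl
    simp only [scanRunsB, dif_pos hl]
    cases pre with
    | nil =>
      rw [List.nil_append] at hsplit
      obtain ⟨hit, hsuf⟩ := List.cons.inj (hhead.symm.trans hsplit)
      rw [if_pos hit, runEndB_eq, hsuf]
      have hle : leadC t suf ≤ l.length := by
        calc leadC t suf ≤ suf.length := leadC_le_length t suf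
        _ ≤ (l.drop i).length := by rw [hsplit]; simp
        _ ≤ l.length := by simp
      rw [hit, min_eq_right hle]
      simp only [List.length_nil, Prod.mk.injEq]
      constructor <;> (push_cast; ring)
    | cons p pre' =>
      rw [List.cons_append] at hsplit
      obtain ⟨hip, htail⟩ := List.cons.inj (hhead.symm.trans hsplit)
      simp only [List.mem_cons, not_or] at hp
      have hpt : ¬ l[i] = t := by rw [hip]; exact fun h => hp.1 h.symm
      rw [if_neg hpt, runEndB_eq, htail]
      set r := leadC l[i] (pre' ++ t :: suf) with hr
      have hrle : r ≤ pre'.length := leadC_append_ne l[i] t hpt pre' suf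
      have hrlen : r ≤ l.length := by
        have : pre'.length ≤ l.length := by
          have : (pre' ++ t :: suf).length ≤ l.length := by
            rw [← htail]; simp
          simp at this; omega
        omega
      rw [min_eq_right hrlen]
      have hdropnew : l.drop (i + r + 1) = pre'.drop r ++ t :: suf := by
        have h1 : l.drop (i + r + 1) = (l.drop (i + 1)).drop r := by
          rw [List.drop_drop]; congr 1; omega
        have h0 : r - pre'.length = 0 := by omega
        rw [h1, htail, List.drop_append, h0, List.drop_zero]
      have := ih (i + r + 1) (by omega) (pre'.drop r)
        suf hdropnew (fun hm => hp.2 (List.drop_subset _ _ hm))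
      rw [this]
      have hlen : (pre'.drop r).length = pre'.length - r := by simp
      simp only [Prod.ext_iff, hlen, List.length_cons]
      constructor <;> (push_cast [Nat.cast_sub hrle]; ring)

-- ===== VERDICT (by name: the statement is the Claim_ definition above) =====
theorem find_sequence_indices_spec : Claim_equal_find_sequence_indices := by
  unfold Claim_equal_find_sequence_indices
  intro numbers target _
  unfold Spec_find_sequence_indices find_sequence_indices find_sequence_indices_alt
  by_cases hm : target ∈ numbers
  · obtain ⟨k, hk⟩ := Option.isSome_iff_exists.mp
      (Iff.mpr (PySem.List.index?_isSome_iff numbers target) hm)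
    obtain ⟨pre, suf, hsplit, hlen, hpre⟩ :=
      Iff.mp (PySem.List.index?_eq_some_iff numbers target k) hk
    rw [hsplit, goA_split target pre suf 0 le_rfl hpre,
      scanRunsB_mem target (pre ++ target :: suf) (pre ++ target :: suf).length 0
        (by omega) pre suf (by simp) hpre]
    simp
  · rw [goA_not_mem target numbers 0 hm,
      scanRunsB_not_mem target numbers numbers.length 0 (by simpa using hm)]
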